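-- pv_equiv track=rewrite | github.com/miliar/Code_Jam_Webscraper | Solutions_python/Problem_179/3598.py | numberify1
-- ===== SOURCE A (Python) =====
-- N = 32
--
-- def numberify1(l):
--     pow = 1
--     r = 0
--     for i in range(N):
--         if i in l:
--             r += pow
--         pow *= 10
--     return r
-- ===== SOURCE B (Python) =====
-- def numberify1(l):
--     return sum(10**i for i in set(l) if 0 <= i < 32)
-- ===== Notes on version B (the rewrite author's own statement) =====
-- stated objective: faster
-- what changed: Instead of scanning positions 0..31 and doing a linear membership test in l at each (32 scans of l), B does one pass: build set(l) once and sum 10**i over its elements with 0 <= i < 32.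
import Mathlib
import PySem

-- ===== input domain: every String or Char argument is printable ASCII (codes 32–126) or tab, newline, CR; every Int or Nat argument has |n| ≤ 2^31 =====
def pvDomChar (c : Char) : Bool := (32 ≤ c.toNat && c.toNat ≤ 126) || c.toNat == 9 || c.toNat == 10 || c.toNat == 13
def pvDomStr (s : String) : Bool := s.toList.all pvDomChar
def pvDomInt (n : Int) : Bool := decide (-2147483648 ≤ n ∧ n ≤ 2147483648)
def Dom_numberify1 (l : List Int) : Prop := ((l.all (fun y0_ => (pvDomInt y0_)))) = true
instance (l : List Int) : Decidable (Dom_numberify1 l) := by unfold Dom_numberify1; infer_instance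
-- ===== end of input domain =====

-- B replaces A's dense scan of positions 0..31 (membership test at each) by a single
-- sparse pass summing 10^i over the distinct in-range elements of l (idiomatic).

-- ===== PORT A =====
-- pow = 1; r = 0; for i in range(32): if i in l: r += pow; pow *= 10; return r
def numberify1 (l : List Int) : Int :=
  (PySem.List.pyRange 0 32 1).foldl
    (fun (pr : Int × Int) i =>
      let pow := pr.1
      let r := pr.2
      let r := if i ∈ l then r + pow else r
      (pow * 10, r))
    (1, 0) |>.2

-- ===== PORT B =====
-- sum(10**i for i in set(l) if 0 <= i < 32)
def numberify1_alt (l : List Int) : Int :=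
  (((PySem.Set.ofList l).filter (fun i => decide (0 ≤ i ∧ i < 32))).map
    (fun i => (10 : Int) ^ i.toNat)).sum

-- ===== PRECONDITION & SPEC =====
def Spec_numberify1 (l : List Int) (out : Int) : Prop := out = numberify1_alt l
instance (l : List Int) (out : Int) : Decidable (Spec_numberify1 l out) := by unfold Spec_numberify1; infer_instance

-- ===== CLAIM (what is proved, stated in full; the proofs are below) =====
def Claim_equal_numberify1 : Prop := ∀ (l : List Int), Dom_numberify1 l → Spec_numberify1 l (numberify1 l)

-- ===== LEMMAS AND PROOFS =====

-- A's loop, run to n steps: pow = 10^n, r = dense indicator sum over range n.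
theorem numberify1_foldl (l : List Int) (n : ℕ) :
    (PySem.List.pyRange 0 n 1).foldl
      (fun (pr : Int × Int) i =>
        let pow := pr.1
        let r := pr.2
        let r := if i ∈ l then r + pow else r
        (pow * 10, r))
      (1, 0)
    = ((10 : Int) ^ n, ∑ i ∈ Finset.range n, if ((i : Int) ∈ l) then (10 : Int) ^ i else 0) := by
  induction n with
  | zero => simp [PySem.List.pyRange_one_eq_nil]
  | succ n ih =>
    have h : PySem.List.pyRange 0 ((n : Int) + 1) 1
        = PySem.List.pyRange 0 (n : Int) 1 ++ [(n : Int)] :=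
      PySem.List.pyRange_one_succ_right (by positivity)
    push_cast
    rw [h, List.foldl_append, ih]
    simp [Finset.sum_range_succ, pow_succ, mul_comm]
    split_ifs <;> ring

-- A one-point dense sum collapses to the (guarded) single term.
theorem sum_single_point (x : Int) :
    (∑ i ∈ Finset.range 32, if ((i : Int) = x) then (10 : Int) ^ i else 0)
    = if (0 ≤ x ∧ x < 32) then (10 : Int) ^ x.toNat else 0 := by
  by_cases h : 0 ≤ x ∧ x < 32
  · obtain ⟨h0, h32⟩ := h
    obtain ⟨m, rfl⟩ := Int.eq_ofNat_of_zero_le h0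
    have hm : m < 32 := by exact_mod_cast h32
    rw [if_pos ⟨h0, h32⟩]
    rw [Finset.sum_eq_single m]
    · simp
    · intro b _ hb
      rw [if_neg]; exact_mod_cast hb
    · intro hmem; exact absurd (Finset.mem_range.mpr hm) hmem
  · rw [if_neg h]
    apply Finset.sum_eq_zero
    intro i hi
    rw [if_neg]
    rintro rfl
    exact h ⟨Int.natCast_nonneg i, by exact_mod_cast Finset.mem_range.mp hi⟩

-- B's sparse pass over a NODUP list equals the dense indicator sum.
theorem sparse_eq_dense (d : List Int) (hd : d.Nodup) :
    ((d.filter (fun i => decide (0 ≤ i ∧ i < 32))).map (fun i => (10 : Int) ^ i.toNat)).sum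
    = ∑ i ∈ Finset.range 32, if ((i : Int) ∈ d) then (10 : Int) ^ i else 0 := by
  induction d with
  | nil => simp
  | cons x d ih =>
    have hx : x ∉ d := (List.nodup_cons.mp hd).1
    have hsplit : ∀ i ∈ Finset.range 32,
        (if ((i : Int) ∈ x :: d) then (10 : Int) ^ i else 0)
        = (if ((i : Int) = x) then (10 : Int) ^ i else 0)
          + (if ((i : Int) ∈ d) then (10 : Int) ^ i else 0) := by
      intro i _
      by_cases hix : (i : Int) = x
      · subst hix
        simp [hx]
      · by_cases hid : (i : Int) ∈ d <;> simp [hix, hid]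
    rw [Finset.sum_congr rfl hsplit, Finset.sum_add_distrib, sum_single_point,
      ← ih (List.nodup_cons.mp hd).2]
    by_cases hp : 0 ≤ x ∧ x < 32 <;> simp [hp]

theorem numberify1_eq (l : List Int) : numberify1 l = numberify1_alt l := by
  unfold numberify1 numberify1_alt
  rw [sparse_eq_dense (PySem.Set.ofList l) (PySem.Set.nodup_ofList l)]
  have h := numberify1_foldl l 32
  push_cast at h
  rw [h]
  simp [PySem.Set.mem_ofList]

-- ===== VERDICT (by name: the statement is the Claim_ definition above) =====
theorem numberify1_spec : Claim_equal_numberify1 := by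
  intro l _
  exact numberify1_eq l
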